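-- pv_equiv track=rewrite | github.com/alexveider1/Ultimate-Macroeconomics-Dashboard | app/pages/page_utils.py | _resolve_default_countries
-- ===== SOURCE A (Python) =====
-- DEFAULT_COUNTRY_ALIASES = {
--     "USA": "United States",
--     "CHN": "China",
--     "DEU": "Germany",
-- }
--
-- def _resolve_default_countries(available_countries: list[str]) -> list[str]:
--     if not available_countries:
--         return []
--
--     normalized_to_original = {
--         str(code).strip().upper(): str(code).strip() for code in available_countries
--     }
--
--     defaults: list[str] = []
--     for iso_code in DEFAULT_COUNTRY_ALIASES:
--         key = iso_code.strip().upper()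
--         if key in normalized_to_original:
--             defaults.append(normalized_to_original[key])
--     return defaults
-- ===== SOURCE B (Python) =====
-- DEFAULT_COUNTRY_ALIASES = {
--     "USA": "United States",
--     "CHN": "China",
--     "DEU": "Germany",
-- }
--
-- def _resolve_default_countries(available_countries: list[str]) -> list[str]:
--     # Single forward pass with three fixed slots; each match overwrites its
--     # slot, so the last matching original wins; assemble in alias order.
--     usa = chn = deu = None
--     for code in available_countries:
--         c = str(code).strip()
--         u = c.upper()
--         if u == "USA":
--             usa = c
--         elif u == "CHN":
--             chn = c
--         elif u == "DEU":
--             deu = c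
--     return [x for x in (usa, chn, deu) if x is not None]
-- ===== Notes on version B (the rewrite author's own statement) =====
-- stated objective: alternative
-- what changed: Replaces A's build-a-normalization-dict-then-iterate-aliases strategy with one forward pass over the list keeping three fixed slots (one per alias) that are overwritten on each match, then assembling the non-None slots in alias order.
import Mathlib
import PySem

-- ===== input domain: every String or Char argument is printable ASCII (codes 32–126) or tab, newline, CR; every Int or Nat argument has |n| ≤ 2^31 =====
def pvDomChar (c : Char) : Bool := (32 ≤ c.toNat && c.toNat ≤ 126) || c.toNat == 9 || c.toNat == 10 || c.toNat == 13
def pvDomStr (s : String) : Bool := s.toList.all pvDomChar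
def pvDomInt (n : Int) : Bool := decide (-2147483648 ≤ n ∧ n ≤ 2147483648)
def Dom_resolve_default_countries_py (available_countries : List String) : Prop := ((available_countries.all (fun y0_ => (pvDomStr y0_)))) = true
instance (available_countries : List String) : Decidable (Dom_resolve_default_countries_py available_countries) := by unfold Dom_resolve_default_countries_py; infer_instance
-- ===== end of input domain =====

-- B replaces A's normalization dict + alias loop with one forward pass keeping
-- three fixed, overwritten slots — an alternative decomposition, same cost.
-- ===== PORT A =====
def resolve_default_countries_py (available_countries : List String) : List String :=
  if available_countries = [] then []
  else
    let normalized_to_original :=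
      available_countries.foldl
        (fun d code => d.insert (PySem.Str.upper (PySem.Str.strip code)) (PySem.Str.strip code))
        PySem.Dict.empty
    (["USA", "CHN", "DEU"]).foldl
      (fun defaults iso_code =>
        let key := PySem.Str.upper (PySem.Str.strip iso_code)
        match normalized_to_original.get? key with
        | some v => defaults ++ [v]
        | none => defaults) []

-- ===== PORT B =====
def resolve_default_countries_py_alt (available_countries : List String) : List String :=
  let s := available_countries.foldl
    (fun (st : Option String × Option String × Option String) code =>
      let c := PySem.Str.strip code
      let u := PySem.Str.upper c
      if u = "USA" then (some c, st.2.1, st.2.2)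
      else if u = "CHN" then (st.1, some c, st.2.2)
      else if u = "DEU" then (st.1, st.2.1, some c)
      else st)
    (none, none, none)
  [s.1, s.2.1, s.2.2].filterMap id

-- ===== PRECONDITION & SPEC =====
def Spec_resolve_default_countries_py (available_countries : List String) (out : List String) : Prop := out = resolve_default_countries_py_alt available_countries
instance (available_countries : List String) (out : List String) : Decidable (Spec_resolve_default_countries_py available_countries out) := by unfold Spec_resolve_default_countries_py; infer_instance

-- ===== CLAIM =====
def Claim_equal_resolve_default_countries_py : Prop := ∀ (available_countries : List String), Dom_resolve_default_countries_py available_countries → Spec_resolve_default_countries_py available_countries (resolve_default_countries_py available_countries)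

-- ===== LEMMAS AND PROOFS =====
-- last stripped element whose normalization equals key
def pvLastMatch (key : String) (l : List String) : Option String :=
  l.foldl (fun o code =>
    if PySem.Str.upper (PySem.Str.strip code) = key then some (PySem.Str.strip code) else o) none

theorem dict_get_eq_lastMatch (l : List String) (key : String) :
    (l.foldl
      (fun d code => d.insert (PySem.Str.upper (PySem.Str.strip code)) (PySem.Str.strip code))
      PySem.Dict.empty).get? key = pvLastMatch key l := by
  induction l using List.reverseRecOn with
  | nil => rfl
  | append_singleton l x ih =>
    rw [List.foldl_append]
    unfold pvLastMatch
    rw [List.foldl_append]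
    simp only [List.foldl, PySem.Dict.get?_insert]
    by_cases h : key = PySem.Str.upper (PySem.Str.strip x)
    · simp [h]
    · simp [h, Ne.symm h]; exact ih

theorem triple_fold_eq (l : List String) (a b c : Option String) :
    l.foldl
      (fun (st : Option String × Option String × Option String) code =>
        let cc := PySem.Str.strip code
        let u := PySem.Str.upper cc
        if u = "USA" then (some cc, st.2.1, st.2.2)
        else if u = "CHN" then (st.1, some cc, st.2.2)
        else if u = "DEU" then (st.1, st.2.1, some cc)
        else st)
      (a, b, c)
    = (l.foldl (fun o code => if PySem.Str.upper (PySem.Str.strip code) = "USA" then some (PySem.Str.strip code) else o) a,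
       l.foldl (fun o code => if PySem.Str.upper (PySem.Str.strip code) = "CHN" then some (PySem.Str.strip code) else o) b,
       l.foldl (fun o code => if PySem.Str.upper (PySem.Str.strip code) = "DEU" then some (PySem.Str.strip code) else o) c) := by
  induction l generalizing a b c with
  | nil => rfl
  | cons x xs ih =>
    simp only [List.foldl]
    by_cases h1 : PySem.Str.upper (PySem.Str.strip x) = "USA"
    · simp [h1, ih]
    · by_cases h2 : PySem.Str.upper (PySem.Str.strip x) = "CHN"
      · simp [h2, ih]
      · by_cases h3 : PySem.Str.upper (PySem.Str.strip x) = "DEU"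
        · simp [h3, ih]
        · simp [h1, h2, h3, ih]

theorem lastMatch_from_none (key : String) (l : List String) :
    l.foldl (fun o code => if PySem.Str.upper (PySem.Str.strip code) = key then some (PySem.Str.strip code) else o) none
    = pvLastMatch key l := rfl

-- ===== VERDICT =====
theorem resolve_default_countries_py_spec : Claim_equal_resolve_default_countries_py := by
  intro l _
  unfold Spec_resolve_default_countries_py resolve_default_countries_py resolve_default_countries_py_alt
  by_cases h : l = []
  · subst h; rfl
  · simp only [h, if_false]
    simp only [triple_fold_eq, lastMatch_from_none]
    have kU : PySem.Str.upper (PySem.Str.strip "USA") = "USA" := by decide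
    have kC : PySem.Str.upper (PySem.Str.strip "CHN") = "CHN" := by decide
    have kD : PySem.Str.upper (PySem.Str.strip "DEU") = "DEU" := by decide
    simp only [List.foldl, kU, kC, kD, dict_get_eq_lastMatch]
    cases pvLastMatch "USA" l <;> cases pvLastMatch "CHN" l <;> cases pvLastMatch "DEU" l <;> simp
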